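-- pv_equiv track=rewrite | github.com/dstamp1NYCDOE/data-specialist-flask | app/scripts/programming/request_inform/initial_request_inform.py | return_CTE_major
-- ===== SOURCE A (Python) =====
-- def return_CTE_major(list_of_courses):
--
--     for fd_course in ['AFS61TF', 'AFS63TD', 'AFS63TDB', 'AFS63TDC',"AFS63TDA", 'AFS65TC', 'AFS65TCH','AFS65TCT']:
--         if fd_course in list_of_courses:
--             return 'Fashion Design'
--
--     for vp_course in ['BMS61TV', 'BMS63TT', 'BMS65TW']:
--         if vp_course in list_of_courses:
--             return 'Visual Presentation'
--
--     for fmm_course in ['TUS21TA', 'BRS11TF', 'BNS21TV']: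
--         if fmm_course in list_of_courses:
--             return 'Fashion Marketing & Management'
--
--     for wd_course in ['SKS21X', 'TQS21TQW', 'TQS21TQS']:
--         if wd_course in list_of_courses:
--             return 'Software Development'
--
--     for photo_course in ['ACS21T', 'ACS22T', 'ALS21TP']:
--         if photo_course in list_of_courses:
--             return 'Photography'
--
--     for a_and_d_course in ['AUS11TA', 'APS11T', 'ACS11TD', 'AES11TE', 'ALS21T']:
--         if a_and_d_course in list_of_courses:
--             return 'Art and Design'
-- ===== SOURCE B (Python) =====
-- def return_CTE_major(list_of_courses):
--     tables = [
--         ('Fashion Design', ['AFS61TF', 'AFS63TD', 'AFS63TDB', 'AFS63TDC', 'AFS63TDA', 'AFS65TC', 'AFS65TCH', 'AFS65TCT']),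
--         ('Visual Presentation', ['BMS61TV', 'BMS63TT', 'BMS65TW']),
--         ('Fashion Marketing & Management', ['TUS21TA', 'BRS11TF', 'BNS21TV']),
--         ('Software Development', ['SKS21X', 'TQS21TQW', 'TQS21TQS']),
--         ('Photography', ['ACS21T', 'ACS22T', 'ALS21TP']),
--         ('Art and Design', ['AUS11TA', 'APS11T', 'ACS11TD', 'AES11TE', 'ALS21T']),
--     ]
--     index = {}
--     rank = 0
--     for major, courses in tables:
--         for c in courses:
--             index[c] = (rank, major)
--             rank += 1
--     best = None
--     for course in list_of_courses:
--         hit = index.get(course)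
--         if hit is not None:
--             if best is None or hit[0] < best[0]:
--                 best = hit
--     return best[1] if best is not None else None
-- ===== Notes on version B (the rewrite author's own statement) =====
-- stated objective: faster
-- what changed: Instead of scanning six category tables in priority order and testing each course code for membership in the input list, B builds one dict mapping every course code to a (priority rank, major) pair and makes a single pass over the input keeping the lowest-ranked hit (O(1) dict lookups replace repeated list membership scans).
import Mathlib
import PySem

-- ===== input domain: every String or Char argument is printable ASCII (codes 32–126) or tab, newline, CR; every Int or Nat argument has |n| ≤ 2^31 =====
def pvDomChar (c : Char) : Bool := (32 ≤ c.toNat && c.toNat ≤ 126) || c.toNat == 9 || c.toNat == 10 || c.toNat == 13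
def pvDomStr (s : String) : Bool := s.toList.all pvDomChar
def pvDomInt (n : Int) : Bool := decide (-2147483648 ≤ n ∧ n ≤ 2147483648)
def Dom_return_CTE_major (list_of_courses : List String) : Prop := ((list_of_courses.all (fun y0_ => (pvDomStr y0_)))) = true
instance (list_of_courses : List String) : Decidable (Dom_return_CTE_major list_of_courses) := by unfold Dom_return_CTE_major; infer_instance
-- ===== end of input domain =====

-- B replaces A's priority-ordered membership scans of six category tables by one course→(rank, major) index
-- and a single minimum-rank pass over the input (measured faster in a timing run).

-- ===== PORT A =====
-- each Python 'for c in [...]: if c in list_of_courses: return M' loop, step for step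
def pvLoopReturn (courses : List String) (xs : List String) (result : String) : Option String :=
  match courses with
  | [] => none
  | c :: rest => if xs.contains c then some result else pvLoopReturn rest xs result

def return_CTE_major (list_of_courses : List String) : Option String :=
  match pvLoopReturn ["AFS61TF", "AFS63TD", "AFS63TDB", "AFS63TDC", "AFS63TDA", "AFS65TC", "AFS65TCH", "AFS65TCT"] list_of_courses "Fashion Design" with
  | some r => some r
  | none =>
  match pvLoopReturn ["BMS61TV", "BMS63TT", "BMS65TW"] list_of_courses "Visual Presentation" with
  | some r => some r
  | none =>
  match pvLoopReturn ["TUS21TA", "BRS11TF", "BNS21TV"] list_of_courses "Fashion Marketing & Management" with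
  | some r => some r
  | none =>
  match pvLoopReturn ["SKS21X", "TQS21TQW", "TQS21TQS"] list_of_courses "Software Development" with
  | some r => some r
  | none =>
  match pvLoopReturn ["ACS21T", "ACS22T", "ALS21TP"] list_of_courses "Photography" with
  | some r => some r
  | none =>
  match pvLoopReturn ["AUS11TA", "APS11T", "ACS11TD", "AES11TE", "ALS21T"] list_of_courses "Art and Design" with
  | some r => some r
  | none => none

-- ===== PORT B =====
def pvTables : List (String × List String) :=
  [("Fashion Design", ["AFS61TF", "AFS63TD", "AFS63TDB", "AFS63TDC", "AFS63TDA", "AFS65TC", "AFS65TCH", "AFS65TCT"]),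
   ("Visual Presentation", ["BMS61TV", "BMS63TT", "BMS65TW"]),
   ("Fashion Marketing & Management", ["TUS21TA", "BRS11TF", "BNS21TV"]),
   ("Software Development", ["SKS21X", "TQS21TQW", "TQS21TQS"]),
   ("Photography", ["ACS21T", "ACS22T", "ALS21TP"]),
   ("Art and Design", ["AUS11TA", "APS11T", "ACS11TD", "AES11TE", "ALS21T"])]

-- the index-building nested loop of Source B: (index, rank) accumulator
def pvIndex : PySem.Dict String (Int × String) :=
  (pvTables.foldl
    (fun (acc : PySem.Dict String (Int × String) × Int) entry =>
      entry.2.foldl (fun acc c => (acc.1.insert c (acc.2, entry.1), acc.2 + 1)) acc)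
    (PySem.Dict.empty, 0)).1

def pvStep (best : Option (Int × String)) (course : String) : Option (Int × String) :=
  match pvIndex.get? course with
  | none => best
  | some hit =>
    match best with
    | none => some hit
    | some b => if hit.1 < b.1 then some hit else some b

def return_CTE_major_alt (list_of_courses : List String) : Option String :=
  match list_of_courses.foldl pvStep none with
  | none => none
  | some b => some b.2

-- ===== PRECONDITION & SPEC =====
def Spec_return_CTE_major (list_of_courses : List String) (out : Option String) : Prop := out = return_CTE_major_alt list_of_courses
instance (list_of_courses : List String) (out : Option String) : Decidable (Spec_return_CTE_major list_of_courses out) := by unfold Spec_return_CTE_major; infer_instance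

-- ===== CLAIM (what is proved, stated in full; the proofs are below) =====
def Claim_equal_return_CTE_major : Prop := ∀ (list_of_courses : List String), Dom_return_CTE_major list_of_courses → Spec_return_CTE_major list_of_courses (return_CTE_major list_of_courses)

-- ===== LEMMAS AND PROOFS =====
set_option maxHeartbeats 800000

-- the flattened priority table: (course code, rank, major), ranks strictly increasing
def pvRanked : List (String × Int × String) :=
  [("AFS61TF", 0, "Fashion Design"), ("AFS63TD", 1, "Fashion Design"), ("AFS63TDB", 2, "Fashion Design"),
   ("AFS63TDC", 3, "Fashion Design"), ("AFS63TDA", 4, "Fashion Design"), ("AFS65TC", 5, "Fashion Design"),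
   ("AFS65TCH", 6, "Fashion Design"), ("AFS65TCT", 7, "Fashion Design"),
   ("BMS61TV", 8, "Visual Presentation"), ("BMS63TT", 9, "Visual Presentation"), ("BMS65TW", 10, "Visual Presentation"),
   ("TUS21TA", 11, "Fashion Marketing & Management"), ("BRS11TF", 12, "Fashion Marketing & Management"),
   ("BNS21TV", 13, "Fashion Marketing & Management"),
   ("SKS21X", 14, "Software Development"), ("TQS21TQW", 15, "Software Development"), ("TQS21TQS", 16, "Software Development"),
   ("ACS21T", 17, "Photography"), ("ACS22T", 18, "Photography"), ("ALS21TP", 19, "Photography"),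
   ("AUS11TA", 20, "Art and Design"), ("APS11T", 21, "Art and Design"), ("ACS11TD", 22, "Art and Design"),
   ("AES11TE", 23, "Art and Design"), ("ALS21T", 24, "Art and Design")]

def pvCombine (a b : Option (Int × String)) : Option (Int × String) :=
  match b with
  | none => a
  | some e =>
    match a with
    | none => some e
    | some ae => if e.1 < ae.1 then some e else some ae

lemma pvIndex_eq : pvIndex = PySem.Dict.mk pvRanked := by decide

lemma pvCombine_none_left (b : Option (Int × String)) : pvCombine none b = b := by
  cases b <;> rfl

lemma pvCombine_assoc (a b c : Option (Int × String)) :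
    pvCombine (pvCombine a b) c = pvCombine a (pvCombine b c) := by
  cases a with
  | none => cases b <;> cases c <;> simp [pvCombine] <;> split_ifs <;> simp_all
  | some x =>
    cases b with
    | none => cases c <;> simp [pvCombine]
    | some y =>
      cases c with
      | none => simp [pvCombine]
      | some z =>
        by_cases h1 : y.1 < x.1 <;> by_cases h2 : z.1 < y.1 <;> by_cases h3 : z.1 < x.1 <;>
          simp [pvCombine, h1, h2, h3] <;> omega

lemma pvGet_eq_find (t : List (String × Int × String)) (c : String) :
    (PySem.Dict.mk t).get? c = (t.find? (fun p => p.1 == c)).map (·.2) := by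
  induction t with
  | nil => simp [PySem.Dict.get?]
  | cons h tl ih =>
    obtain ⟨k, v⟩ := h
    rw [PySem.Dict.get?_mk_cons]
    cases hk : (k == c) <;> simp [hk, ih]

lemma pvKey (t : List (String × Int × String)) (hp : t.Pairwise (fun a b => a.2.1 < b.2.1))
    (c : String) (cs : List String) :
    pvCombine ((t.find? (fun p => p.1 == c)).map (·.2)) ((t.find? (fun p => decide (p.1 ∈ cs))).map (·.2))
      = (t.find? (fun p => decide (p.1 ∈ c :: cs))).map (·.2) := by
  induction t with
  | nil => simp [pvCombine]
  | cons hd tl ih =>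
    obtain ⟨k, r, m⟩ := hd
    rw [List.pairwise_cons] at hp
    obtain ⟨hlt, hp'⟩ := hp
    by_cases hkc : k = c
    · subst hkc
      have h1 : ((k == k) : Bool) = true := by simp
      have h3 : (decide (k ∈ k :: cs)) = true := by simp
      by_cases hkcs : k ∈ cs
      · have h2 : (decide (k ∈ cs)) = true := by simp [hkcs]
        simp only [List.find?_cons, h1, h2, h3]
        simp [pvCombine]
      · have h2 : (decide (k ∈ cs)) = false := by simp [hkcs]
        simp only [List.find?_cons, h1, h2, h3]
        cases hf : tl.find? (fun p => decide (p.1 ∈ cs)) with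
        | none => simp [pvCombine]
        | some e =>
          have hmem := List.mem_of_find?_eq_some hf
          have hre : r < e.2.1 := hlt e hmem
          simp [pvCombine, not_lt_of_gt hre]
    · have h1 : ((k == c) : Bool) = false := by simp [hkc]
      by_cases hkcs : k ∈ cs
      · have h2 : (decide (k ∈ cs)) = true := by simp [hkcs]
        have h3 : (decide (k ∈ c :: cs)) = true := by simp [hkcs]
        simp only [List.find?_cons, h1, h2, h3]
        cases hf : tl.find? (fun p => p.1 == c) with
        | none => simp [pvCombine]
        | some e =>
          have hmem := List.mem_of_find?_eq_some hf
          have hre : r < e.2.1 := hlt e hmem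
          simp [pvCombine, hre]
      · have h2 : (decide (k ∈ cs)) = false := by simp [hkcs]
        have h3 : (decide (k ∈ c :: cs)) = false := by simp [hkc, hkcs]
        simp only [List.find?_cons, h1, h2, h3]
        exact ih hp'

lemma pvStep_eq (b : Option (Int × String)) (c : String) :
    pvStep b c = pvCombine b ((pvRanked.find? (fun p => p.1 == c)).map (·.2)) := by
  unfold pvStep
  rw [pvIndex_eq, pvGet_eq_find]
  cases (pvRanked.find? (fun p => p.1 == c)).map (·.2) <;> cases b <;> rfl

lemma pvRanked_pairwise : pvRanked.Pairwise (fun a b => a.2.1 < b.2.1) := by decide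

lemma pvFold_eq (xs : List String) (b : Option (Int × String)) :
    xs.foldl pvStep b = pvCombine b ((pvRanked.find? (fun p => decide (p.1 ∈ xs))).map (·.2)) := by
  induction xs generalizing b with
  | nil =>
    have h : pvRanked.find? (fun p => decide (p.1 ∈ ([] : List String))) = none := by
      rw [List.find?_eq_none]; intro x _; simp
    rw [List.foldl_nil, h]
    cases b <;> rfl
  | cons c cs ih =>
    rw [List.foldl_cons, ih, pvStep_eq, pvCombine_assoc,
      pvKey pvRanked pvRanked_pairwise c cs]

def pvL1 : List String := ["AFS61TF", "AFS63TD", "AFS63TDB", "AFS63TDC", "AFS63TDA", "AFS65TC", "AFS65TCH", "AFS65TCT"]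
def pvL2 : List String := ["BMS61TV", "BMS63TT", "BMS65TW"]
def pvL3 : List String := ["TUS21TA", "BRS11TF", "BNS21TV"]
def pvL4 : List String := ["SKS21X", "TQS21TQW", "TQS21TQS"]
def pvL5 : List String := ["ACS21T", "ACS22T", "ALS21TP"]
def pvL6 : List String := ["AUS11TA", "APS11T", "ACS11TD", "AES11TE", "ALS21T"]

def pvS1 : List (String × Int × String) := pvRanked.take 8
def pvS2 : List (String × Int × String) := (pvRanked.drop 8).take 3
def pvS3 : List (String × Int × String) := (pvRanked.drop 11).take 3
def pvS4 : List (String × Int × String) := (pvRanked.drop 14).take 3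
def pvS5 : List (String × Int × String) := (pvRanked.drop 17).take 3
def pvS6 : List (String × Int × String) := pvRanked.drop 20

lemma pvLoop_eq_find (L : List String) (xs : List String) (M : String) :
    pvLoopReturn L xs M = (L.find? (fun c => decide (c ∈ xs))).map (fun _ => M) := by
  induction L with
  | nil => rfl
  | cons c rest ih =>
    simp only [pvLoopReturn, List.find?_cons]
    have hc : xs.contains c = decide (c ∈ xs) := by simp [List.contains_iff_mem]
    rw [hc]
    cases h : decide (c ∈ xs) <;> simp [ih]

lemma pvSeg (xs : List String) (S : List (String × Int × String)) (L : List String) (M : String) :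
    (∀ p ∈ S, p.2.2 = M) → S.map (fun p => p.1) = L →
    (S.find? (fun p => decide (p.1 ∈ xs))).map (fun p => p.2.2)
      = (L.find? (fun c => decide (c ∈ xs))).map (fun _ => M) := by
  induction S generalizing L with
  | nil => intro _ hfst; subst hfst; rfl
  | cons p S' ih =>
    intro hmaj hfst
    subst hfst
    simp only [List.map_cons, List.find?_cons]
    cases h : decide (p.1 ∈ xs)
    · simpa using ih _ (fun r hr => hmaj r (List.mem_cons_of_mem p hr)) rfl
    · simp [hmaj p (List.mem_cons_self ..)]

lemma pvFindAppend (S T : List (String × Int × String)) (p : (String × Int × String) → Bool) :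
    (S ++ T).find? p = match S.find? p with | some x => some x | none => T.find? p := by
  induction S with
  | nil => rfl
  | cons a S' ih =>
    simp only [List.cons_append, List.find?_cons]
    cases p a <;> simp [ih]

lemma pvA_eq_find (xs : List String) :
    return_CTE_major xs = (pvRanked.find? (fun p => decide (p.1 ∈ xs))).map (fun p => p.2.2) := by
  have hR : pvRanked = pvS1 ++ (pvS2 ++ (pvS3 ++ (pvS4 ++ (pvS5 ++ pvS6)))) := by rfl
  conv_rhs => rw [hR]
  rw [pvFindAppend, pvFindAppend, pvFindAppend, pvFindAppend, pvFindAppend]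
  have h1 := pvSeg xs pvS1 pvL1 "Fashion Design" (by decide) (by decide)
  have h2 := pvSeg xs pvS2 pvL2 "Visual Presentation" (by decide) (by decide)
  have h3 := pvSeg xs pvS3 pvL3 "Fashion Marketing & Management" (by decide) (by decide)
  have h4 := pvSeg xs pvS4 pvL4 "Software Development" (by decide) (by decide)
  have h5 := pvSeg xs pvS5 pvL5 "Photography" (by decide) (by decide)
  have h6 := pvSeg xs pvS6 pvL6 "Art and Design" (by decide) (by decide)
  show (match pvLoopReturn pvL1 xs "Fashion Design" with
    | some r => some r
    | none => match pvLoopReturn pvL2 xs "Visual Presentation" with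
    | some r => some r
    | none => match pvLoopReturn pvL3 xs "Fashion Marketing & Management" with
    | some r => some r
    | none => match pvLoopReturn pvL4 xs "Software Development" with
    | some r => some r
    | none => match pvLoopReturn pvL5 xs "Photography" with
    | some r => some r
    | none => match pvLoopReturn pvL6 xs "Art and Design" with
    | some r => some r
    | none => none) = _
  rw [pvLoop_eq_find, pvLoop_eq_find, pvLoop_eq_find, pvLoop_eq_find, pvLoop_eq_find,
    pvLoop_eq_find]
  cases e1 : pvL1.find? (fun c => decide (c ∈ xs)) with
  | some r =>
    rw [e1] at h1
    obtain ⟨p1, hp1, hm1⟩ := Option.map_eq_some_iff.mp h1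
    simp only [e1, hp1, Option.map_some, hm1]
  | none =>
    rw [e1] at h1
    have n1 := Option.map_eq_none_iff.mp h1
    simp only [e1, n1, Option.map_none]
    cases e2 : pvL2.find? (fun c => decide (c ∈ xs)) with
    | some r =>
      rw [e2] at h2
      obtain ⟨p2, hp2, hm2⟩ := Option.map_eq_some_iff.mp h2
      simp only [e2, hp2, Option.map_some, hm2]
    | none =>
      rw [e2] at h2
      have n2 := Option.map_eq_none_iff.mp h2
      simp only [e2, n2, Option.map_none]
      cases e3 : pvL3.find? (fun c => decide (c ∈ xs)) with
      | some r =>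
        rw [e3] at h3
        obtain ⟨p3, hp3, hm3⟩ := Option.map_eq_some_iff.mp h3
        simp only [e3, hp3, Option.map_some, hm3]
      | none =>
        rw [e3] at h3
        have n3 := Option.map_eq_none_iff.mp h3
        simp only [e3, n3, Option.map_none]
        cases e4 : pvL4.find? (fun c => decide (c ∈ xs)) with
        | some r =>
          rw [e4] at h4
          obtain ⟨p4, hp4, hm4⟩ := Option.map_eq_some_iff.mp h4
          simp only [e4, hp4, Option.map_some, hm4]
        | none =>
          rw [e4] at h4
          have n4 := Option.map_eq_none_iff.mp h4
          simp only [e4, n4, Option.map_none]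
          cases e5 : pvL5.find? (fun c => decide (c ∈ xs)) with
          | some r =>
            rw [e5] at h5
            obtain ⟨p5, hp5, hm5⟩ := Option.map_eq_some_iff.mp h5
            simp only [e5, hp5, Option.map_some, hm5]
          | none =>
            rw [e5] at h5
            have n5 := Option.map_eq_none_iff.mp h5
            simp only [e5, n5, Option.map_none]
            cases e6 : pvL6.find? (fun c => decide (c ∈ xs)) with
            | some r =>
              rw [e6] at h6
              obtain ⟨p6, hp6, hm6⟩ := Option.map_eq_some_iff.mp h6
              simp only [e6, hp6, Option.map_some, hm6]
            | none =>
              rw [e6] at h6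
              have n6 := Option.map_eq_none_iff.mp h6
              simp only [e6, n6, Option.map_none]

-- ===== VERDICT (by name: the statement is the Claim_ definition above) =====
theorem return_CTE_major_spec : Claim_equal_return_CTE_major := by
  intro xs _
  unfold Spec_return_CTE_major return_CTE_major_alt
  rw [pvFold_eq, pvCombine_none_left, pvA_eq_find]
  cases pvRanked.find? (fun p => decide (p.1 ∈ xs)) <;> rfl
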